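-- pv_equiv track=rewrite | github.com/VickeeX/LeetCodePy | dataBasedSolution/ArraySolution.py | maxDistToClosest1
-- ===== SOURCE A (Python) =====
-- def maxDistToClosest1(seats):
--     ans, last = 1, 0
--     for i, n in enumerate(seats):
--         if n == 0:
--             if last == 0 or i == len(seats) - 1:
--                 ans = max(ans, i - last + 1)
--             else:
--                 ans = max(ans, (i - last) // 2 + 1)
--             if seats[i - 1] == 1:
--                 last = i
--         else:
--             last = i + 1
--     return ans
-- ===== SOURCE B (Python) =====
-- def maxDistToClosest1(seats):
--     occ = [i for i, s in enumerate(seats) if s != 0]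
--     if not occ:
--         return max(len(seats), 1)
--     ans = max(1, occ[0])
--     for a, b in zip(occ, occ[1:]):
--         ans = max(ans, (b - a) // 2)
--     return max(ans, len(seats) - 1 - occ[-1])
-- ===== Notes on version B (the rewrite author's own statement) =====
-- stated objective: alternative
-- what changed: B first collects the occupied indices once and then takes a single max over the three run kinds (leading run, gaps between consecutive occupied seats, trailing run), instead of A's stateful scan that tracks 'last' and updates a running answer per seat with branch logic and a negative-index lookup.
import Mathlib
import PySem

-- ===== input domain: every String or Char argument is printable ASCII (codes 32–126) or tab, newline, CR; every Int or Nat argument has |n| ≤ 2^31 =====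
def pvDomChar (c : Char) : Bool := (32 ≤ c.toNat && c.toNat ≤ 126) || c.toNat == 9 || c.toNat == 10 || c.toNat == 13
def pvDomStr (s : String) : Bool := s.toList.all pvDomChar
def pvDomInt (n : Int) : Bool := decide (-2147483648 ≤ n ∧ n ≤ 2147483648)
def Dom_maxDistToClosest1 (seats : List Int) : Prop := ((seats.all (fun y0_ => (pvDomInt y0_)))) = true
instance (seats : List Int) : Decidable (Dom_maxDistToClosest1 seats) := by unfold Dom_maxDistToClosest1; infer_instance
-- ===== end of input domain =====

-- B replaces A's stateful per-seat scan by one max over the occupied-index list (same O(n) cost); return values proved equal on all int lists.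

-- ===== PORT A =====
def maxDistToClosest1 (seats : List Int) : Int :=
  ((PySem.List.enumerate seats).foldl
    (fun (st : Int × Int) (en : Int × Int) =>
      if en.2 = 0 then
        (if st.2 = 0 ∨ en.1 = (seats.length : Int) - 1 then max st.1 (en.1 - st.2 + 1)
         else max st.1 (PySem.Int.floordiv (en.1 - st.2) 2 + 1),
         if PySem.List.pyGet? seats (en.1 - 1) = some 1 then en.1 else st.2)
      else (st.1, en.1 + 1))
    (1, 0)).1

-- ===== PORT B =====
def maxDistToClosest1_alt (seats : List Int) : Int :=
  let occ : List Int := (PySem.List.enumerate seats).filterMap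
    (fun en => if en.2 ≠ 0 then some en.1 else none)
  match occ with
  | [] => max (seats.length : Int) 1
  | f :: rest =>
      let ans := (List.zip (f :: rest) rest).foldl
        (fun a p => max a (PySem.Int.floordiv (p.2 - p.1) 2)) (max 1 f)
      max ans ((seats.length : Int) - 1 - (f :: rest).getLast (List.cons_ne_nil f rest))

-- ===== PRECONDITION & SPEC =====
def Spec_maxDistToClosest1 (seats : List Int) (out : Int) : Prop := out = maxDistToClosest1_alt seats
instance (seats : List Int) (out : Int) : Decidable (Spec_maxDistToClosest1 seats out) := by unfold Spec_maxDistToClosest1; infer_instance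

-- ===== CLAIM (what is proved, stated in full; the proofs are below) =====
def Claim_equal_maxDistToClosest1 : Prop := ∀ (seats : List Int), Dom_maxDistToClosest1 seats → Spec_maxDistToClosest1 seats (maxDistToClosest1 seats)

-- ===== LEMMAS AND PROOFS =====

-- A's loop with the (always no-op) `seats[i-1] == 1` update removed.
def pvRec2 : List Int → Int → Int → Int → Int
  | [], _, ans, _ => ans
  | x :: t, i, ans, last =>
    if x = 0 then
      pvRec2 t (i + 1)
        (if last = 0 ∨ t = [] then max ans (i - last + 1)
         else max ans (PySem.Int.floordiv (i - last) 2 + 1)) last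
    else pvRec2 t (i + 1) ans (i + 1)

-- the max of the remaining contributions (dominant value of each run only)
def pvW : List Int → Int → Int → Int
  | [], _, _ => 1
  | x :: t, i, last =>
    if x = 0 then
      if t = [] then i - last + 1 else pvW t (i + 1) last
    else max (if last = 0 then i else PySem.Int.floordiv (i - last + 1) 2) (pvW t (i + 1) (i + 1))

-- absolute indices of the nonzero entries
def pvOcc : List Int → Int → List Int
  | [], _ => []
  | x :: t, i => if x = 0 then pvOcc t (i + 1) else i :: pvOcc t (i + 1)

-- pvW expressed over the occupied-index list (i = current index, n' = end index)
def pvE : List Int → Int → Int → Int → Int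
  | [], i, n', last => if n' = i then 1 else n' - last
  | k :: ks, _, n', last =>
      max (if last = 0 then k else PySem.Int.floordiv (k - last + 1) 2) (pvE ks (k + 1) n' (k + 1))

theorem pvOcc_eq_filterMap (t : List Int) (i : Int) :
    (PySem.List.enumerate t i).filterMap (fun en => if en.2 ≠ 0 then some en.1 else none)
      = pvOcc t i := by
  induction t generalizing i with
  | nil => simp [pvOcc, PySem.List.enumerate_nil]
  | cons x t ih =>
    rw [PySem.List.enumerate_cons]
    by_cases hx : x = 0 <;> simp [pvOcc, hx] <;> simpa using ih (i + 1)

theorem pvRec2_eq_fold (seats : List Int) :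
    ∀ (t : List Int) (i ans last : Int), 0 ≤ i →
      t = seats.drop i.toNat → i.toNat ≤ seats.length →
      (∀ p, PySem.List.pyGet? seats (i - 1) = some p → p = 1 → last = i) →
      ((PySem.List.enumerate t i).foldl
        (fun (st : Int × Int) (en : Int × Int) =>
          if en.2 = 0 then
            (if st.2 = 0 ∨ en.1 = (seats.length : Int) - 1 then max st.1 (en.1 - st.2 + 1)
             else max st.1 (PySem.Int.floordiv (en.1 - st.2) 2 + 1),
             if PySem.List.pyGet? seats (en.1 - 1) = some 1 then en.1 else st.2)
          else (st.1, en.1 + 1)) (ans, last)).1 = pvRec2 t i ans last := by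
  intro t
  induction t with
  | nil => intro i ans last _ _ _ _; simp [pvRec2, PySem.List.enumerate_nil]
  | cons x t ih =>
    intro i ans last hi ht hlen hyp
    have hlt : i.toNat < seats.length := by
      by_contra h
      rw [List.drop_eq_nil_of_le (by omega)] at ht
      exact List.cons_ne_nil x t ht
    have hx : seats[i.toNat]? = some x := by
      have h0 : (seats.drop i.toNat)[0]? = seats[i.toNat + 0]? := List.getElem?_drop
      rw [← ht] at h0
      simpa using h0.symm
    have hdrop : t = seats.drop (i + 1).toNat := by
      have h0 : List.drop 1 (List.drop i.toNat seats) = List.drop (i.toNat + 1) seats :=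
        List.drop_drop
      rw [← ht] at h0
      have h1 : (i + 1).toNat = i.toNat + 1 := by omega
      simp only [h1, ← h0, List.drop_one, List.tail_cons]
    have hget : PySem.List.pyGet? seats ((i + 1) - 1) = some x := by
      rw [show i + 1 - 1 = i by ring, PySem.List.pyGet?_of_nonneg seats hi, hx]
    rw [PySem.List.enumerate_cons, List.foldl_cons, pvRec2]
    dsimp only
    by_cases hx0 : x = 0
    · rw [if_pos hx0, if_pos hx0]
      have hlast : (if PySem.List.pyGet? seats (i - 1) = some 1 then i else last) = last := by
        split
        · next hg => exact (hyp 1 hg rfl).symm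
        · rfl
      rw [hlast]
      have hiff : (i = (seats.length : Int) - 1) ↔ (t = []) := by
        have h1 : (x :: t).length = (seats.drop i.toNat).length := congrArg List.length ht
        simp only [List.length_cons, List.length_drop] at h1
        rw [List.eq_nil_iff_length_eq_zero]
        omega
      rw [ih (i + 1) _ last (by omega) hdrop (by omega)
          (fun p hp hp1 => by
            rw [hget] at hp
            cases hp
            exact absurd hp1 (by omega))]
      by_cases hc : last = 0 ∨ t = []
      · rw [if_pos (show last = 0 ∨ i = (seats.length : Int) - 1 by rw [hiff]; exact hc),
            if_pos hc]
      · rw [if_neg (show ¬(last = 0 ∨ i = (seats.length : Int) - 1) by rw [hiff]; exact hc),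
            if_neg hc]
    · rw [if_neg hx0, if_neg hx0]
      exact ih (i + 1) ans (i + 1) (by omega) hdrop (by omega) (fun p hp hp1 => rfl)

theorem pvW_lower (t : List Int) : ∀ (j last : Int), t ≠ [] → 0 ≤ last → last ≤ j →
    (if last = 0 then j else PySem.Int.floordiv (j - last + 1) 2) ≤ pvW t j last := by
  have hfd : ∀ a : Int, PySem.Int.floordiv a 2 = a / 2 :=
    fun a => PySem.Int.floordiv_eq_ediv_of_pos (by norm_num)
  induction t with
  | nil => intro j last h; exact absurd rfl h
  | cons x t ih =>
    intro j last _ h0 hj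
    rw [pvW]
    by_cases hx : x = 0
    · simp only [if_pos hx]
      by_cases ht : t = []
      · simp only [if_pos ht, hfd]; split <;> omega
      · simp only [if_neg ht]
        have := ih (j + 1) last ht h0 (by omega)
        simp only [hfd] at this ⊢
        split at this <;> split <;> omega
    · simp only [if_neg hx]
      exact le_max_left _ _

theorem pvRec2_eq_max_pvW (t : List Int) :
    ∀ (i last ans : Int), 0 ≤ last → last ≤ i → 1 ≤ ans →
      (last = 0 → i ≤ ans) →
      (1 ≤ last → PySem.Int.floordiv (i - last + 1) 2 ≤ ans) →
      pvRec2 t i ans last = max ans (pvW t i last) := by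
  have hfd : ∀ a : Int, PySem.Int.floordiv a 2 = a / 2 :=
    fun a => PySem.Int.floordiv_eq_ediv_of_pos (by norm_num)
  induction t with
  | nil => intro i last ans _ _ h1 _ _; rw [pvRec2, pvW]; omega
  | cons x t ih =>
    intro i last ans h0 hli h1 hz ho
    rw [pvRec2, pvW]
    by_cases hx : x = 0
    · rw [if_pos hx, if_pos hx]
      by_cases ht : t = []
      · subst ht
        rw [if_pos (Or.inr rfl), if_pos rfl, pvRec2]
      · rw [if_neg ht]
        by_cases hl0 : last = 0
        · subst hl0
          rw [if_pos (Or.inl rfl),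
            ih (i + 1) 0 (max ans (i - 0 + 1)) le_rfl (by omega) (by omega)
              (fun _ => by omega) (by omega)]
          have hw := pvW_lower t (i + 1) 0 ht le_rfl (by omega)
          rw [if_pos rfl] at hw
          omega
        · have h1l : 1 ≤ last := by omega
          rw [if_neg (by tauto),
            ih (i + 1) last (max ans (PySem.Int.floordiv (i - last) 2 + 1)) h0 (by omega)
              (by omega) (fun h => absurd h hl0)
              (fun _ => by
                have h2 : i + 1 - last + 1 = (i - last) + 2 := by ring
                rw [h2, hfd, hfd]
                omega)]
          have hw := pvW_lower t (i + 1) last ht h0 (by omega)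
          rw [if_neg hl0] at hw
          simp only [hfd] at hw ⊢
          have h2 : i + 1 - last + 1 = (i - last) + 2 := by ring
          rw [h2] at hw
          omega
    · rw [if_neg hx, if_neg hx]
      rw [ih (i + 1) (i + 1) ans (by omega) le_rfl h1 (fun h => by omega)
          (fun _ => by
            have h2 : i + 1 - (i + 1) + 1 = 1 := by ring
            rw [h2, hfd]; omega)]
      have hc : (if last = 0 then i else PySem.Int.floordiv (i - last + 1) 2) ≤ ans := by
        by_cases hl0 : last = 0
        · simp only [if_pos hl0]; exact hz hl0
        · simp only [if_neg hl0]; exact ho (by omega)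
      omega

theorem pvW_eq_pvE (t : List Int) : ∀ (i last : Int),
    pvW t i last = pvE (pvOcc t i) i (i + t.length) last := by
  induction t with
  | nil => intro i last; simp [pvW, pvOcc, pvE]
  | cons x t ih =>
    intro i last
    rw [pvW, pvOcc]
    by_cases hx : x = 0
    · rw [if_pos hx, if_pos hx]
      by_cases ht : t = []
      · subst ht
        rw [if_pos rfl, pvOcc, pvE, if_neg (by push_cast [List.length_cons]; omega)]
        push_cast [List.length_cons, List.length_nil]
        ring
      · rw [if_neg ht, ih (i + 1) last]
        rcases hocc : pvOcc t (i + 1) with _ | ⟨k, ks⟩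
        · have hlen : t.length ≠ 0 := fun h => ht (List.eq_nil_iff_length_eq_zero.mpr h)
          rw [pvE, pvE, if_neg (by push_cast [List.length_cons]; omega),
            if_neg (by push_cast [List.length_cons]; omega)]
          push_cast [List.length_cons]
          omega
        · rw [pvE, pvE]
          have h2 : i + 1 + (t.length : Int) = i + ((x :: t).length : Int) := by
            push_cast [List.length_cons]; ring
          rw [h2]
    · rw [if_neg hx, if_neg hx, ih (i + 1) (i + 1), pvE]
      have h2 : i + 1 + (t.length : Int) = i + ((x :: t).length : Int) := by
        push_cast [List.length_cons]; ring
      rw [h2]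

theorem pvE_fold (ks : List Int) : ∀ (prev acc n : Int), 1 ≤ acc → 0 ≤ prev →
    (∀ x ∈ ks, 0 ≤ x) →
    max ((List.zip (prev :: ks) ks).foldl
          (fun a p => max a (PySem.Int.floordiv (p.2 - p.1) 2)) acc)
        (n - 1 - (prev :: ks).getLast (List.cons_ne_nil prev ks))
      = max acc (pvE ks (prev + 1) n (prev + 1)) := by
  have hfd : ∀ a : Int, PySem.Int.floordiv a 2 = a / 2 :=
    fun a => PySem.Int.floordiv_eq_ediv_of_pos (by norm_num)
  induction ks with
  | nil =>
    intro prev acc n h1 h0 _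
    have hg : (prev :: ([] : List Int)).getLast (List.cons_ne_nil _ _) = prev := rfl
    simp only [List.zip_nil_right, List.foldl_nil, hg, pvE]
    by_cases hn : n = prev + 1
    · rw [if_pos hn]
      subst hn
      rw [show prev + 1 - 1 - prev = 0 from by ring, max_eq_left (by omega), max_eq_left h1]
    · rw [if_neg hn]
      congr 1
      ring
  | cons k ks ih =>
    intro prev acc n h1 h0 hks
    have hzip : List.zip (prev :: k :: ks) (k :: ks) = (prev, k) :: List.zip (k :: ks) ks := by
      simp [List.zip_cons_cons]
    rw [hzip, List.foldl_cons]
    have hgl : (prev :: k :: ks).getLast (List.cons_ne_nil _ _)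
        = (k :: ks).getLast (List.cons_ne_nil _ _) := List.getLast_cons _
    rw [hgl, ih k (max acc (PySem.Int.floordiv (k - prev) 2)) n (le_max_of_le_left h1)
        (hks k List.mem_cons_self) (fun x hx => hks x (List.mem_cons_of_mem _ hx)), pvE]
    rw [if_neg (show ¬ (prev + 1 = 0) by omega)]
    have : k - (prev + 1) + 1 = k - prev := by ring
    rw [this]
    omega

theorem pvOcc_nonneg (t : List Int) : ∀ (i : Int), 0 ≤ i → ∀ x ∈ pvOcc t i, 0 ≤ x := by
  induction t with
  | nil => intro i _ x hx; simp [pvOcc] at hx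
  | cons y t ih =>
    intro i hi x hx
    rw [pvOcc] at hx
    by_cases hy : y = 0
    · rw [if_pos hy] at hx
      exact ih (i + 1) (by omega) x hx
    · rw [if_neg hy] at hx
      rcases List.mem_cons.mp hx with h | h
      · omega
      · exact ih (i + 1) (by omega) x h

-- ===== VERDICT (by name: the statement is the Claim_ definition above) =====
theorem maxDistToClosest1_spec : Claim_equal_maxDistToClosest1 := by
  intro seats _
  unfold Spec_maxDistToClosest1 maxDistToClosest1 maxDistToClosest1_alt
  have hA : (((PySem.List.enumerate seats 0).foldl
      (fun (st : Int × Int) (en : Int × Int) =>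
        if en.2 = 0 then
          (if st.2 = 0 ∨ en.1 = (seats.length : Int) - 1 then max st.1 (en.1 - st.2 + 1)
           else max st.1 (PySem.Int.floordiv (en.1 - st.2) 2 + 1),
           if PySem.List.pyGet? seats (en.1 - 1) = some 1 then en.1 else st.2)
        else (st.1, en.1 + 1)) ((1 : Int), (0 : Int))).1)
      = pvRec2 seats 0 1 0 :=
    pvRec2_eq_fold seats seats 0 1 0 le_rfl (by simp) (by simp)
      (fun p _ _ => rfl)
  rw [hA, pvRec2_eq_max_pvW seats 0 0 1 le_rfl le_rfl le_rfl (fun _ => by omega)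
      (fun h => by omega), pvW_eq_pvE, pvOcc_eq_filterMap]
  rcases hocc : pvOcc seats 0 with _ | ⟨f, rest⟩
  · simp only [pvE]
    have : (0 : Int) + (seats.length : Int) = (seats.length : Int) := by ring
    rw [this]
    have hn : (0 : Int) ≤ (seats.length : Int) := by positivity
    split <;> omega
  · simp only [pvE, if_true]
    have hnn := pvOcc_nonneg seats 0 le_rfl
    rw [hocc] at hnn
    have hP := pvE_fold rest f (max 1 f) ((seats.length : Int)) (le_max_left _ _)
      (hnn f List.mem_cons_self) (fun x hx => hnn x (List.mem_cons_of_mem _ hx))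
    have h0 : (0 : Int) + (seats.length : Int) = (seats.length : Int) := by ring
    rw [h0, hP]
    omega
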